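-- pv_equiv track=rewrite | github.com/chiseungii/baekjoon | 13877.py | toHexa
-- ===== SOURCE A (Python) =====
-- def toHexa(n):
--     base = 1; result = 0
--     while n > 0:
--         a = n % 10
--         result += (a * base)
--         base *= 16
--         n //= 10
--
--     return result
-- ===== SOURCE B (Python) =====
-- def toHexa(n):
--     # A's while-loop never runs for n < 0, so it returns 0 there.
--     if n < 0:
--         return 0
--     result = 0
--     for c in str(n):
--         result = result * 16 + int(c)
--     return result
-- ===== Notes on version B (the rewrite author's own statement) =====
-- stated objective: alternative
-- what changed: Instead of A's arithmetic loop peeling digits least-significant-first while maintaining a running power of 16, B converts n to its decimal string and folds over the characters most-significant-first with Horner's rule (result = result*16 + digit), keeping only one accumulator.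
import Mathlib
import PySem

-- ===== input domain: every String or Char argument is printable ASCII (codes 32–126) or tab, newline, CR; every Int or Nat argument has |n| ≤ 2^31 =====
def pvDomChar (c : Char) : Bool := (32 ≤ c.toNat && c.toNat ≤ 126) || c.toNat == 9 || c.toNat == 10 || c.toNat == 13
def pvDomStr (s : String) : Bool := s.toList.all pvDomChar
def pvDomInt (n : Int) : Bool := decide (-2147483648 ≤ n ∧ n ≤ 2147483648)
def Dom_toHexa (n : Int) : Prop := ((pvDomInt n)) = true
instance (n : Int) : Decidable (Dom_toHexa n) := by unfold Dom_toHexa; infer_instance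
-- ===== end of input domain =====

-- B replaces A's least-significant-first arithmetic loop (power-of-16 + accumulator) by a Horner fold over the decimal string str(n); objective: alternative decomposition.


-- ===== PORT A =====
-- A's while loop with state (n, base, result)
def toHexaLoop (n base result : Int) : Int :=
  if h : n > 0 then
    toHexaLoop (PySem.Int.floordiv n 10) (base * 16)
      (result + (PySem.Int.mod n 10) * base)
  else result
termination_by n.toNat
decreasing_by
  have := PySem.Int.floordiv_eq_ediv_of_pos (a := n) (b := 10) (by omega)
  rw [this]; omega

def toHexa (n : Int) : Int := toHexaLoop n 1 0

-- ===== PORT B =====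
-- int(c) for a single digit character c: exact on '0'..'9', the only characters str(n) yields for n ≥ 0
def pvDigit (c : Char) : Int := (c.toNat : Int) - 48

def toHexa_alt (n : Int) : Int :=
  if n < 0 then 0
  else (PySem.Int.toStr n).toList.foldl (fun r c => r * 16 + pvDigit c) 0

-- ===== PRECONDITION & SPEC =====
def Spec_toHexa (n : Int) (out : Int) : Prop := out = toHexa_alt n
instance (n : Int) (out : Int) : Decidable (Spec_toHexa n out) := by unfold Spec_toHexa; infer_instance

-- ===== CLAIM (what is proved, stated in full; the proofs are below) =====
def Claim_equal_toHexa : Prop := ∀ (n : Int), Dom_toHexa n → Spec_toHexa n (toHexa n)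

-- ===== LEMMAS AND PROOFS =====

-- the common value: the decimal digits of m read as base-16 digits
def pvVal (m : Nat) : Int :=
  if h : m = 0 then 0 else pvVal (m / 10) * 16 + ((m % 10 : Nat) : Int)
decreasing_by exact Nat.div_lt_self (by omega) (by omega)

-- the decimal digit characters of m, most significant first
def pvDec (m : Nat) : List Char :=
  if h : m < 10 then [Nat.digitChar m]
  else pvDec (m / 10) ++ [Nat.digitChar (m % 10)]
decreasing_by exact Nat.div_lt_self (by omega) (by omega)

theorem pvDigit_digitChar (d : Nat) (h : d < 10) : pvDigit (Nat.digitChar d) = d := by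
  interval_cases d <;> decide

theorem toDigitsCore_eq (m : Nat) : ∀ (fuel : Nat) (ds : List Char), m < fuel →
    Nat.toDigitsCore 10 fuel m ds = pvDec m ++ ds := by
  intro fuel ds hf
  match fuel with
  | 0 => omega
  | f + 1 =>
    rw [Nat.toDigitsCore]
    by_cases h10 : m < 10
    · have hz : m / 10 = 0 := Nat.div_eq_of_lt h10
      have hmod : m % 10 = m := Nat.mod_eq_of_lt h10
      rw [pvDec]
      simp [hz, hmod, h10]
    · have hz : ¬ m / 10 = 0 := by omega
      simp only [if_neg hz]
      rw [toDigitsCore_eq (m / 10) f (Nat.digitChar (m % 10) :: ds) (by omega)]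
      conv_rhs => rw [pvDec]
      simp only [dif_neg h10]
      simp
termination_by m
decreasing_by exact Nat.div_lt_self (by omega) (by omega)

theorem toDigits_eq (m : Nat) : Nat.toDigits 10 m = pvDec m := by
  unfold Nat.toDigits
  rw [toDigitsCore_eq m (m + 1) [] (by omega)]
  simp

theorem foldl_pvDec (m : Nat) :
    (pvDec m).foldl (fun r c => r * 16 + pvDigit c) 0 = pvVal m := by
  by_cases h10 : m < 10
  · rw [pvDec]
    simp only [dif_pos h10, List.foldl]
    rw [pvDigit_digitChar m h10]
    by_cases h0 : m = 0
    · subst h0; rw [pvVal]; simp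
    · have hz : m / 10 = 0 := Nat.div_eq_of_lt h10
      rw [pvVal, dif_neg h0, hz, pvVal]
      simp [Nat.mod_eq_of_lt h10]
  · rw [pvDec]
    simp only [dif_neg h10]
    rw [List.foldl_append]
    rw [foldl_pvDec (m / 10)]
    simp only [List.foldl]
    rw [pvDigit_digitChar (m % 10) (Nat.mod_lt _ (by omega))]
    conv_rhs => rw [pvVal]
    rw [dif_neg (by omega : ¬ m = 0)]
termination_by m
decreasing_by exact Nat.div_lt_self (by omega) (by omega)

theorem toHexaLoop_eq (n : Int) : ∀ (base result : Int), 0 ≤ n →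
    toHexaLoop n base result = result + base * pvVal n.toNat := by
  by_cases h : n > 0
  · have hd : PySem.Int.floordiv n 10 = n / 10 :=
      PySem.Int.floordiv_eq_ediv_of_pos (by omega)
    have hm : PySem.Int.mod n 10 = n % 10 :=
      PySem.Int.mod_eq_emod_of_pos (by omega)
    have hlt : (n / 10).toNat < n.toNat := by omega
    intro base result _
    rw [toHexaLoop]
    simp only [h, dif_pos]
    rw [hd, hm, toHexaLoop_eq (n / 10) _ _ (by omega)]
    have h1 : (n / 10).toNat = n.toNat / 10 := by omega
    have h2 : ((n.toNat % 10 : Nat) : Int) = n % 10 := by omega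
    rw [h1]
    conv_rhs => rw [pvVal]
    rw [dif_neg (by omega : ¬ n.toNat = 0)]
    rw [h2]
    ring
  · intro base result hn
    have h0 : n = 0 := by omega
    subst h0
    rw [toHexaLoop]
    simp only [dif_neg h]
    rw [pvVal]
    simp
termination_by n.toNat
decreasing_by exact hlt

-- ===== VERDICT (by name: the statement is the Claim_ definition above) =====
theorem toHexa_spec : Claim_equal_toHexa := by
  intro n _
  unfold Spec_toHexa toHexa toHexa_alt
  by_cases hn : n < 0
  · rw [toHexaLoop]
    simp only [dif_neg (by omega : ¬ n > 0), if_pos hn]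
  · rw [toHexaLoop_eq n 1 0 (by omega)]
    simp only [if_neg hn]
    rw [PySem.Int.toList_toStr]
    simp only [PySem.Int.toChars, if_neg hn]
    rw [toDigits_eq, foldl_pvDec]
    ring
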